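-- pv_equiv track=rewrite | github.com/mpl901227/recursive | modules/ai-analysis/src/tools/utils/predictive_maintenance_engine.py | _determine_failure_type
-- ===== SOURCE A (Python) =====
-- from typing import Dict, List, Any, Optional, Union, Tuple, Iterator
--
-- def _determine_failure_type(risk_factors: List[str]) -> str:
--     """장애 유형 결정"""
--     if any("cpu" in factor for factor in risk_factors):
--         return "performance_degradation"
--     elif any("memory" in factor for factor in risk_factors):
--         return "memory_exhaustion"
--     elif any("disk" in factor for factor in risk_factors):
--         return "storage_failure"
--     elif any("error" in factor for factor in risk_factors):
--         return "application_error"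
--     else:
--         return "general_system_failure"
-- ===== SOURCE B (Python) =====
-- _LABELS = ["performance_degradation", "memory_exhaustion", "storage_failure",
--            "application_error", "general_system_failure"]
--
-- def _rank(factor):
--     """Numeric severity rank of a single factor (0 = highest priority, 4 = none)."""
--     if "cpu" in factor:
--         return 0
--     if "memory" in factor:
--         return 1
--     if "disk" in factor:
--         return 2
--     if "error" in factor:
--         return 3
--     return 4
--
-- def _determine_failure_type(risk_factors):
--     """장애 유형 결정 — min-reduction of per-factor ranks, then a table lookup."""
--     best = 4
--     for factor in risk_factors:
--         best = min(best, _rank(factor))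
--     return _LABELS[best]
-- ===== Notes on version B (the rewrite author's own statement) =====
-- stated objective: alternative
-- what changed: Replaced four priority-ordered any() scans with an argmin formulation: each factor is mapped to a numeric severity rank, a single min-reduction finds the best rank, and the label comes from a table lookup.
import Mathlib
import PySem

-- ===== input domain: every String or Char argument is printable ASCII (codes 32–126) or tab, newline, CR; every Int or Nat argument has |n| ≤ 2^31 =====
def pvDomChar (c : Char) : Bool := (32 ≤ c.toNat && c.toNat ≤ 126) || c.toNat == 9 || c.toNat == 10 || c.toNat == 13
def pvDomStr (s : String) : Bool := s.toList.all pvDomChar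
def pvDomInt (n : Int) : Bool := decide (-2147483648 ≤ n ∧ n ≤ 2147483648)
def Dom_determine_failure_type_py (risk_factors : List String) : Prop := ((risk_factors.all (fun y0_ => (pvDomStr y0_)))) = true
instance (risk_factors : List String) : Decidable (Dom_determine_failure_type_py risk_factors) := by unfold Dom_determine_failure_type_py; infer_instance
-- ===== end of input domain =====

-- B replaces A's four priority-ordered scans by an argmin: each factor gets a numeric severity rank, a single min-reduction picks the best, and a table lookup yields the label (alternative decomposition, same cost).


-- ===== PORT A =====
def determine_failure_type_py (risk_factors : List String) : String :=
  if risk_factors.any (fun factor => PySem.Str.isIn "cpu" factor) then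
    "performance_degradation"
  else if risk_factors.any (fun factor => PySem.Str.isIn "memory" factor) then
    "memory_exhaustion"
  else if risk_factors.any (fun factor => PySem.Str.isIn "disk" factor) then
    "storage_failure"
  else if risk_factors.any (fun factor => PySem.Str.isIn "error" factor) then
    "application_error"
  else
    "general_system_failure"

-- ===== PORT B =====
def pvLabels : List String :=
  ["performance_degradation", "memory_exhaustion", "storage_failure",
   "application_error", "general_system_failure"]

def pvRank (factor : String) : Nat :=
  if PySem.Str.isIn "cpu" factor then 0
  else if PySem.Str.isIn "memory" factor then 1
  else if PySem.Str.isIn "disk" factor then 2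
  else if PySem.Str.isIn "error" factor then 3
  else 4

def determine_failure_type_py_alt (risk_factors : List String) : String :=
  let best := risk_factors.foldl (fun b factor => min b (pvRank factor)) 4
  pvLabels.getD best "general_system_failure"

-- ===== PRECONDITION & SPEC =====
def Spec_determine_failure_type_py (risk_factors : List String) (out : String) : Prop := out = determine_failure_type_py_alt risk_factors
instance (risk_factors : List String) (out : String) : Decidable (Spec_determine_failure_type_py risk_factors out) := by unfold Spec_determine_failure_type_py; infer_instance

-- ===== CLAIM (what is proved, stated in full; the proofs are below) =====
def Claim_equal_determine_failure_type_py : Prop := ∀ (risk_factors : List String), Dom_determine_failure_type_py risk_factors → Spec_determine_failure_type_py risk_factors (determine_failure_type_py risk_factors)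

-- ===== LEMMAS AND PROOFS =====

/-- The chained-`any` value that characterises the minimum rank. -/
def pvChain (rs : List String) : Nat :=
  if rs.any (fun f => PySem.Str.isIn "cpu" f) then 0
  else if rs.any (fun f => PySem.Str.isIn "memory" f) then 1
  else if rs.any (fun f => PySem.Str.isIn "disk" f) then 2
  else if rs.any (fun f => PySem.Str.isIn "error" f) then 3
  else 4

theorem chain_min_bool (a1 a2 a3 a4 b1 b2 b3 b4 : Bool) :
    (if (a1 || b1) then 0 else if (a2 || b2) then 1 else if (a3 || b3) then 2
     else if (a4 || b4) then 3 else (4 : Nat)) =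
    min (if a1 then 0 else if a2 then 1 else if a3 then 2 else if a4 then 3 else 4)
        (if b1 then 0 else if b2 then 1 else if b3 then 2 else if b4 then 3 else 4) := by
  revert a1 a2 a3 a4 b1 b2 b3 b4; decide

theorem pvChain_cons (x : String) (xs : List String) :
    pvChain (x :: xs) = min (pvRank x) (pvChain xs) := by
  unfold pvChain pvRank
  simp only [List.any_cons]
  exact chain_min_bool _ _ _ _ _ _ _ _

theorem foldl_min_rank (rs : List String) (b : Nat) (hb : b ≤ 4) :
    rs.foldl (fun b factor => min b (pvRank factor)) b = min b (pvChain rs) := by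
  induction rs generalizing b with
  | nil =>
      simp only [List.foldl_nil, pvChain, List.any_nil, Bool.false_eq_true, if_false]
      omega
  | cons x xs ih =>
      rw [List.foldl_cons, ih (min b (pvRank x)) (le_trans (Nat.min_le_left _ _) hb),
        pvChain_cons, Nat.min_assoc]

-- ===== VERDICT (by name: the statement is the Claim_ definition above) =====
theorem determine_failure_type_py_spec : Claim_equal_determine_failure_type_py := by
  intro rs _
  unfold Spec_determine_failure_type_py determine_failure_type_py determine_failure_type_py_alt
  rw [foldl_min_rank _ _ (by omega)]
  unfold pvChain
  split_ifs <;> rfl
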